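-- pv_equiv track=rewrite | github.com/GiggioIlGriggio/green_areas_detection | src/green-areas-detection/utils/utils.py | get_crop_index
-- ===== SOURCE A (Python) =====
-- def get_crop_index(crop_size, step, w, h):
--     """Return the crops indices.
--
--     In particular, it returns the indices of the top-left corner of the crops.
--
--     Parameters
--     ----------
--     crop_size : int
--         Height and width of the crops, i.e. C
--     step : int
--         Step used for generating the crops, i.e. the stride
--     w : int
--         Width of the original image
--     h : int
--         Height of the original image
--
--     Returns
--     -------
--     crop_indices : list of list
--         List of couples (y_i, x_i), representing the coordinates of the top-left
--         corner of each crop.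
--         So, the length of `crop_indices` is M, which is the total number of crops.
--     """
--     y_cur = 0  # upper left
--     crop_indices = []
--
--     while y_cur + crop_size < h:  # top-down
--
--         x_cur = 0
--         crop_indices += [[y_cur, x_cur]]
--
--         while x_cur + crop_size < w:  # left to right
--             if x_cur + step + crop_size < w:
--                 x_cur += step
--             else:
--                 x_cur = w - crop_size
--             crop_indices += [[y_cur, x_cur]]
--
--         if y_cur + step + crop_size < h:
--             y_cur += step
--         else:  # y of last row
--             y_cur = h - crop_size
--             x_cur = 0
--             crop_indices += [[y_cur, x_cur]]
--
--         # last row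
--         while x_cur + crop_size < w:
--             if x_cur + step + crop_size < w:
--                 x_cur += step
--             else:
--                 x_cur = w - crop_size
--             crop_indices += [[y_cur, x_cur]]
--     return crop_indices
-- ===== SOURCE B (Python) =====
-- def get_crop_index(crop_size, step, w, h):
--     """Same values as A: precompute 1D positions, then take the product."""
--     if crop_size >= h:
--         return []
--
--     def positions(L):
--         pos = [0]
--         x = 0
--         while x + crop_size < L:
--             if x + step + crop_size < L:
--                 x += step
--             else:
--                 x = L - crop_size
--             pos.append(x)
--         return pos
--
--     ys = positions(h)
--     xs = positions(w)
--     return [[y, x] for y in ys for x in xs]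
-- ===== Notes on version B (the rewrite author's own statement) =====
-- stated objective: simpler
-- what changed: Replaces A's woven outer/inner while-loops with a duplicated last-row block by a 1D sliding-position helper run once per axis plus a plain cartesian-product comprehension.
import Mathlib
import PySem

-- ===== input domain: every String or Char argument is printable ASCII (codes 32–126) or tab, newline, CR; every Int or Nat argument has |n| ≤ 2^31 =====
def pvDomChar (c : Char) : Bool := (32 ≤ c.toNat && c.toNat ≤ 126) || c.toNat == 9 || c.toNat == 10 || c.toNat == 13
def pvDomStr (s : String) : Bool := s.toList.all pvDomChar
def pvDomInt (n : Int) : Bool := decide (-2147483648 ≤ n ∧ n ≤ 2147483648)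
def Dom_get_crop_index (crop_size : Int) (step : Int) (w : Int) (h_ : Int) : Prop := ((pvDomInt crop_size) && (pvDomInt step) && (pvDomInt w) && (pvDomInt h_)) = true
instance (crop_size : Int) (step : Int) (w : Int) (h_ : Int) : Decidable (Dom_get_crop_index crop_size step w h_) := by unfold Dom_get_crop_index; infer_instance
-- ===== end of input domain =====

-- B replaces A's woven outer/inner while-loops (with a duplicated last-row block) by a
-- precomputed 1D position list per axis and a plain cartesian product (objective: simpler).

-- ===== PORT A =====
-- inner 'while x_cur + crop_size < w' loop of A; returns (final x_cur, crop_indices).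
-- The Nat argument is a fuel bound used only as a totality guard: callers pass (w - c).toNat + 1
-- style bounds, which are never exhausted when 0 < step (inside Pre_); for step ≤ 0 the Python
-- loop diverges (outside Pre_).
def pyLoopX (c s w y : Int) : Nat → Int → List (List Int) → Int × List (List Int)
  | 0, x, acc => (x, acc)
  | n + 1, x, acc =>
    if x + c < w then
      if x + s + c < w then pyLoopX c s w y n (x + s) (acc ++ [[y, x + s]])
      else pyLoopX c s w y n (w - c) (acc ++ [[y, w - c]])
    else (x, acc)

-- outer 'while y_cur + crop_size < h' loop of A (same fuel totality guard).
-- The trailing pyLoopX call in each branch is A's 'last row' while, exactly as in the Python.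
def pyLoopY (c s w h : Int) : Nat → Int → List (List Int) → List (List Int)
  | 0, _, acc => acc
  | n + 1, y, acc =>
    if y + c < h then
      if y + s + c < h then
        pyLoopY c s w h n (y + s)
          (pyLoopX c s w (y + s) ((w - c).toNat + 1)
            (pyLoopX c s w y ((w - c).toNat + 1) 0 (acc ++ [[y, 0]])).1
            (pyLoopX c s w y ((w - c).toNat + 1) 0 (acc ++ [[y, 0]])).2).2
      else
        pyLoopY c s w h n (h - c)
          (pyLoopX c s w (h - c) ((w - c).toNat + 1) 0
            ((pyLoopX c s w y ((w - c).toNat + 1) 0 (acc ++ [[y, 0]])).2 ++ [[h - c, 0]])).2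
    else acc

def get_crop_index (crop_size : Int) (step : Int) (w : Int) (h_ : Int) : List (List Int) :=
  pyLoopY crop_size step w h_ ((h_ - crop_size).toNat + 1) 0 []

-- ===== PORT B =====
-- Source B's 'positions(L)' helper (same fuel totality guard).
def positionsB (c s L : Int) : Nat → Int → List Int → List Int
  | 0, _, xs => xs
  | n + 1, x, xs =>
    if x + c < L then
      if x + s + c < L then positionsB c s L n (x + s) (xs ++ [x + s])
      else positionsB c s L n (L - c) (xs ++ [L - c])
    else xs

def get_crop_index_alt (crop_size : Int) (step : Int) (w : Int) (h_ : Int) : List (List Int) :=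
  if h_ ≤ crop_size then []
  else
    (positionsB crop_size step h_ ((h_ - crop_size).toNat + 1) 0 [0]).flatMap
      (fun y => (positionsB crop_size step w ((w - crop_size).toNat + 1) 0 [0]).map
        (fun x => [y, x]))

-- ===== PRECONDITION & SPEC =====
-- Pre_ excludes exactly the inputs on which Python A never returns (step ≤ 0 with
-- crop_size < h makes both of A's while-loops advance without progress, so A diverges);
-- on every other input A returns normally.
def Pre_get_crop_index (crop_size : Int) (step : Int) (w : Int) (h_ : Int) : Prop :=
  0 < step ∨ h_ ≤ crop_size
instance (crop_size : Int) (step : Int) (w : Int) (h_ : Int) : Decidable (Pre_get_crop_index crop_size step w h_) := by unfold Pre_get_crop_index; infer_instance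

def pvWitness_get_crop_index : Int × Int × Int × Int := (2, 1, 5, 5)

def Spec_get_crop_index (crop_size : Int) (step : Int) (w : Int) (h_ : Int) (out : List (List Int)) : Prop := out = get_crop_index_alt crop_size step w h_
instance (crop_size : Int) (step : Int) (w : Int) (h_ : Int) (out : List (List Int)) : Decidable (Spec_get_crop_index crop_size step w h_ out) := by unfold Spec_get_crop_index; infer_instance

-- ===== CLAIM (what is proved, stated in full; the proofs are below) =====
def Claim_equal_get_crop_index : Prop := ∀ (crop_size : Int) (step : Int) (w : Int) (h_ : Int), Dom_get_crop_index crop_size step w h_ → Pre_get_crop_index crop_size step w h_ → Spec_get_crop_index crop_size step w h_ (get_crop_index crop_size step w h_)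

-- ===== LEMMAS AND PROOFS =====

-- positionsB is its accumulator followed by its run from the empty accumulator.
theorem posB_acc (c s L : Int) : ∀ (n : Nat) (x : Int) (xs : List Int),
    positionsB c s L n x xs = xs ++ positionsB c s L n x [] := by
  intro n
  induction n with
  | zero => intro x xs; simp [positionsB]
  | succ n ih =>
    intro x xs
    simp only [positionsB]
    split
    · split
      · rw [ih (x + s) (xs ++ [x + s]), ih (x + s) ([] ++ [x + s])]
        simp
      · rw [ih (L - c) (xs ++ [L - c]), ih (L - c) ([] ++ [L - c])]
        simp
    · simp

-- once the position has been clamped to L - c, the loop body never runs again.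
theorem posB_done (c s L : Int) : ∀ (n : Nat), positionsB c s L n (L - c) [] = [] := by
  intro n
  cases n with
  | zero => simp [positionsB]
  | succ n => simp only [positionsB]; rw [if_neg (by omega)]

-- if the guard already fails, A's inner loop returns immediately, for any fuel.
theorem loopX_stuck (c s w y : Int) (n : Nat) (x : Int) (acc : List (List Int))
    (h : ¬ x + c < w) : pyLoopX c s w y n x acc = (x, acc) := by
  cases n with
  | zero => simp [pyLoopX]
  | succ n => simp only [pyLoopX]; rw [if_neg h]

-- with adequate fuel, the final x_cur returned by A's inner loop fails the loop guard.
theorem loopX_fst (c s w y : Int) (hs : 0 < s) : ∀ (n : Nat) (x : Int) (acc : List (List Int)),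
    (w - c - x).toNat < n → ¬ (pyLoopX c s w y n x acc).1 + c < w := by
  intro n
  induction n with
  | zero => intro x acc hn; omega
  | succ n ih =>
    intro x acc hn
    simp only [pyLoopX]
    split
    · split
      · exact ih (x + s) _ (by omega)
      · exact ih (w - c) _ (by omega)
    · rename_i hng
      omega

-- the rows appended by A's inner loop are B's tail positions, each paired with y.
theorem loopX_snd (c s w y : Int) (hs : 0 < s) :
    ∀ (n m : Nat) (x : Int) (acc : List (List Int)),
    (w - c - x).toNat < n → (w - c - x).toNat < m →
    (pyLoopX c s w y n x acc).2 = acc ++ (positionsB c s w m x []).map (fun t => [y, t]) := by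
  intro n
  induction n with
  | zero => intro m x acc hn hm; omega
  | succ n ih =>
    intro m x acc hn hm
    cases m with
    | zero => omega
    | succ m =>
      simp only [pyLoopX, positionsB]
      split
      · split
        · rw [ih m (x + s) _ (by omega) (by omega),
              posB_acc c s w m (x + s) ([] ++ [x + s])]
          simp
        · rw [ih m (w - c) _ (by omega) (by omega),
              posB_acc c s w m (w - c) ([] ++ [w - c])]
          simp
      · simp

-- one unfolding step of positionsB from an empty accumulator, while the guard holds.
theorem posB_succ (c s L : Int) (m : Nat) (x : Int) (h1 : x + c < L) :
    positionsB c s L (m + 1) x [] =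
      if x + s + c < L then (x + s) :: positionsB c s L m (x + s) []
      else (L - c) :: positionsB c s L m (L - c) [] := by
  simp only [positionsB]
  rw [if_pos h1]
  split
  · rw [posB_acc c s L m (x + s) ([] ++ [x + s])]
    simp
  · rw [posB_acc c s L m (L - c) ([] ++ [L - c])]
    simp

-- characterisation of A's outer loop: one row per y-position, each row the x-positions.
theorem loopY_char (c s w h : Int) (hs : 0 < s) :
    ∀ (n m : Nat) (y : Int) (acc : List (List Int)),
    (h - c - y).toNat < n → (h - c - y).toNat < m →
    pyLoopY c s w h n y acc =
      acc ++ (if y + c < h then positionsB c s h m y [y] else []).flatMap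
        (fun yy => (positionsB c s w ((w - c).toNat + 1) 0 [0]).map (fun xx => [yy, xx])) := by
  intro n
  induction n with
  | zero => intro m y acc hn hm; omega
  | succ n ih =>
    intro m y acc hn hm
    cases m with
    | zero => omega
    | succ m =>
      simp only [pyLoopY]
      split
      · rename_i hg
        rw [posB_acc c s h (m + 1) y [y], posB_succ c s h m y hg]
        split
        · rename_i hb
          -- branch 1: the "last row" while is a no-op, y advances by step
          rw [loopX_stuck c s w (y + s) _ _ _
                (loopX_fst c s w y hs ((w - c).toNat + 1) 0 (acc ++ [[y, 0]]) (by omega))]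
          rw [ih m (y + s) _ (by omega) (by omega)]
          rw [if_pos (by omega : y + s + c < h)]
          rw [loopX_snd c s w y hs ((w - c).toNat + 1) ((w - c).toNat + 1) 0 _
                (by omega) (by omega)]
          rw [posB_acc c s h m (y + s) [y + s],
              posB_acc c s w ((w - c).toNat + 1) 0 [0]]
          simp
        · rename_i hb
          -- branch 2: jump to row h - c, emit it fully, then the outer guard fails
          rw [ih m (h - c) _ (by omega) (by omega)]
          rw [if_neg (by omega : ¬ h - c + c < h)]
          rw [loopX_snd c s w (h - c) hs ((w - c).toNat + 1) ((w - c).toNat + 1) 0 _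
                (by omega) (by omega)]
          rw [loopX_snd c s w y hs ((w - c).toNat + 1) ((w - c).toNat + 1) 0 _
                (by omega) (by omega)]
          rw [posB_done c s h m]
          rw [posB_acc c s w ((w - c).toNat + 1) 0 [0]]
          simp
      · rename_i hg
        simp

-- ===== VERDICT (by name: the statement is the Claim_ definition above) =====
theorem get_crop_index_spec : Claim_equal_get_crop_index := by
  intro c s w h _ hpre
  unfold Spec_get_crop_index get_crop_index get_crop_index_alt
  by_cases hs : 0 < s
  · rw [loopY_char c s w h hs ((h - c).toNat + 1) ((h - c).toNat + 1) 0 []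
        (by omega) (by omega)]
    by_cases hch : h ≤ c
    · rw [if_pos hch, if_neg (by omega)]
      simp
    · rw [if_neg hch, if_pos (by omega)]
      simp
  · have hch : h ≤ c := by rcases hpre with h1 | h1 <;> omega
    simp only [pyLoopY]
    rw [if_neg (by omega), if_pos hch]
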